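-- pv_equiv track=rewrite | github.com/skc1395/programmers_test | 프로그래머스/lv0/120882. 등수 매기기/등수 매기기.py | solution
-- ===== SOURCE A (Python) =====
-- def solution(score):
--     count = 1
--     answer = []
--     for i in range(0,len(score)):
--         for j in range(0,len(score)):
--             if sum(score[i]) < sum(score[j]):
--                 count += 1
--         answer.append(count)
--         count = 1
--     return answer
-- ===== SOURCE B (Python) =====
-- def solution(score):
--     sums = [sum(row) for row in score]
--     rank = {}
--     for i, s in enumerate(reversed(sorted(sums))):
--         if s not in rank:
--             rank[s] = i + 1
--     return [rank[s] for s in sums]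
-- ===== Notes on version B (the rewrite author's own statement) =====
-- stated objective: faster
-- what changed: B precomputes each row's sum once, sorts the sums descending, assigns each distinct sum its first index + 1 as rank via a dict built in one pass, and maps the sums through that dict, replacing A's quadratic all-pairs comparison with re-summing inside the inner loop.
import Mathlib
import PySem

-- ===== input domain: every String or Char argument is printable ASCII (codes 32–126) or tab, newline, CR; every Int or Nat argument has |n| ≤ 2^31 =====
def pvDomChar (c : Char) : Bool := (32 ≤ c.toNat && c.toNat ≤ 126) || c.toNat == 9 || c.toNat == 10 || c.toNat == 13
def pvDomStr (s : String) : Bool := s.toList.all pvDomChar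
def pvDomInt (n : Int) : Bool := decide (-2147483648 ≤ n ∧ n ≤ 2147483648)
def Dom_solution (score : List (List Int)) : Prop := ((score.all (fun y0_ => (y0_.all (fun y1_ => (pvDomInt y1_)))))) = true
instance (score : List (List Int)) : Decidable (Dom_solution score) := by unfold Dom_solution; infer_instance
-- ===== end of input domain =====

-- B replaces A's O(n^2*m) all-pairs re-summing with one pass of row sums, a sort, and a
-- first-occurrence rank dictionary (O(n*m + n log n)); same return value everywhere.

-- ===== PORT A =====
def solution (score : List (List Int)) : List Int :=
  (PySem.List.pyRange 0 (PySem.List.len score)).foldl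
    (fun answer i =>
      answer ++
        [(PySem.List.pyRange 0 (PySem.List.len score)).foldl
          (fun count j =>
            if (PySem.List.pyGetD score i []).sum < (PySem.List.pyGetD score j []).sum then
              count + 1
            else count) 1]) []

-- ===== PORT B =====
def solution_alt (score : List (List Int)) : List Int :=
  let sums := score.map (fun row => row.sum)
  let desc := (PySem.List.sorted sums (fun x => x)).reverse
  let rank := desc.zipIdx.foldl
      (fun d p => if d.contains p.1 then d else d.insert p.1 ((p.2 : Int) + 1))
      (PySem.Dict.empty : PySem.Dict Int Int)
  sums.map (fun s => (rank.get? s).getD 0)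

-- ===== PRECONDITION & SPEC =====
def Spec_solution (score : List (List Int)) (out : List Int) : Prop := out = solution_alt score
instance (score : List (List Int)) (out : List Int) : Decidable (Spec_solution score out) := by unfold Spec_solution; infer_instance

-- ===== CLAIM (what is proved, stated in full; the proofs are below) =====
def Claim_equal_solution : Prop := ∀ (score : List (List Int)), Dom_solution score → Spec_solution score (solution score)

-- ===== LEMMAS AND PROOFS =====

-- the rank-building loop step of B's port
def rankStep (d : PySem.Dict Int Int) (p : Int × Nat) : PySem.Dict Int Int :=
  if d.contains p.1 then d else d.insert p.1 ((p.2 : Int) + 1)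

-- once a key is present, the rank loop never changes its value
lemma rank_fold_preserve (l : List (Int × Nat)) (d : PySem.Dict Int Int) (s : Int)
    (hd : d.contains s = true) :
    (l.foldl rankStep d).get? s = d.get? s ∧ (l.foldl rankStep d).contains s = true := by
  induction l generalizing d with
  | nil => exact ⟨rfl, hd⟩
  | cons p l ih =>
    simp only [List.foldl_cons]
    by_cases hc : d.contains p.1
    · simpa [rankStep, hc] using ih d hd
    · have hne : s ≠ p.1 := by
        intro h; rw [h] at hd; simp [hd] at hc
      have hd' : (d.insert p.1 ((p.2 : Int) + 1)).contains s = true := by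
        rw [PySem.Dict.contains_insert]; simp [hd]
      have := ih (d.insert p.1 ((p.2 : Int) + 1)) hd'
      simpa [rankStep, hc, PySem.Dict.get?_insert_of_ne _ _ hne] using this

-- the rank loop assigns each member its first index (offset k) plus one
lemma rank_fold_get (t : List Int) (k : Nat) (d : PySem.Dict Int Int) (s : Int)
    (hs : s ∈ t) (hd : d.contains s = false) :
    ((t.zipIdx k).foldl rankStep d).get? s = some ((k : Int) + (t.idxOf s : Int) + 1) := by
  induction t generalizing k d with
  | nil => cases hs
  | cons a t ih =>
    rw [List.zipIdx_cons, List.foldl_cons]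
    by_cases hsa : s = a
    · subst hsa
      have hstep : rankStep d (s, k) = d.insert s ((k : Int) + 1) := by
        simp [rankStep, hd]
      rw [hstep]
      have hc : (d.insert s ((k : Int) + 1)).contains s = true := by
        rw [PySem.Dict.contains_insert]; simp
      rw [(rank_fold_preserve _ _ _ hc).1, PySem.Dict.get?_insert_self]
      simp [List.idxOf_cons_self]
    · have hst : s ∈ t := by
        cases hs with
        | head => exact absurd rfl hsa
        | tail _ h => exact h
      have hba : (a == s) = false := beq_eq_false_iff_ne.2 (Ne.symm hsa)
      have hidx : (a :: t).idxOf s = t.idxOf s + 1 := by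
        simp [List.idxOf_cons, hba]
      by_cases hc : d.contains a
      · have hstep : rankStep d (a, k) = d := by simp [rankStep, hc]
        rw [hstep, ih (k + 1) d hst hd, hidx]
        congr 1; push_cast; ring
      · have hstep : rankStep d (a, k) = d.insert a ((k : Int) + 1) := by
          simp [rankStep, hc]
        have hd' : (d.insert a ((k : Int) + 1)).contains s = false := by
          rw [PySem.Dict.contains_insert]; simp [hd, hsa]
        rw [hstep, ih (k + 1) _ hst hd', hidx]
        congr 1; push_cast; ring

-- in a descending list the first index of a member counts the strictly greater elements
lemma idxOf_eq_countP_gt (l : List Int) (hl : l.Pairwise (fun a b => b ≤ a)) (s : Int)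
    (hs : s ∈ l) :
    l.idxOf s = l.countP (fun t => decide (s < t)) := by
  induction l with
  | nil => cases hs
  | cons a t ih =>
    have hle : ∀ x ∈ t, x ≤ a := (List.pairwise_cons.1 hl).1
    have ht : t.Pairwise (fun a b => b ≤ a) := (List.pairwise_cons.1 hl).2
    by_cases hsa : s = a
    · subst hsa
      have h0 : t.countP (fun t => decide (s < t)) = 0 := by
        rw [List.countP_eq_zero]
        intro x hx
        simpa using not_lt.2 (hle x hx)
      simp [List.idxOf_cons_self, h0]
    · have hst : s ∈ t := by
        cases hs with
        | head => exact absurd rfl hsa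
        | tail _ h => exact h
      have hlt : s < a := lt_of_le_of_ne (hle s hst) hsa
      have hba : (a == s) = false := beq_eq_false_iff_ne.2 (Ne.symm hsa)
      rw [List.idxOf_cons, List.countP_cons]
      simp [hba, hlt, ih ht hst]

-- A's port computes, for each row, 1 + (number of rows with strictly larger sum)
-- a map over range(len(score)) of a function of score[i] is a map over score
lemma map_pyGet_map (score : List (List Int)) (g : List Int → Int) :
    (PySem.List.pyRange 0 (PySem.List.len score)).map
      (fun i => g (PySem.List.pyGetD score i []))
    = score.map g := by
  conv_rhs => rw [← PySem.List.map_pyGetD_pyRange_zero score []]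
  rw [List.map_map]
  simp only [Function.comp_def]

-- a countP over range(len(score)) of a predicate of score[j] is a countP over score
lemma countP_pyGet (score : List (List Int)) (q : List Int → Bool) :
    (PySem.List.pyRange 0 (PySem.List.len score)).countP
      (fun j => q (PySem.List.pyGetD score j []))
    = score.countP q := by
  conv_rhs => rw [← PySem.List.map_pyGetD_pyRange_zero score []]
  rw [List.countP_map]
  simp only [Function.comp_def]

-- A's port computes, for each row, 1 + (number of rows with strictly larger sum)
lemma solution_eq_canon (score : List (List Int)) :
    solution score =
      (score.map (fun r => r.sum)).map
        (fun s => 1 + ((score.map (fun r => r.sum)).countP (fun t => decide (s < t)) : Int)) := by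
  unfold solution
  rw [PySem.List.foldl_append_singleton_eq_map, List.nil_append]
  have h1 : (PySem.List.pyRange 0 (PySem.List.len score)).map
      (fun i => (PySem.List.pyRange 0 (PySem.List.len score)).foldl
        (fun count j =>
          if (PySem.List.pyGetD score i []).sum < (PySem.List.pyGetD score j []).sum then
            count + 1 else count) 1)
      = (PySem.List.pyRange 0 (PySem.List.len score)).map
        (fun i => 1 + (score.countP
            (fun t => decide ((PySem.List.pyGetD score i []).sum < t.sum)) : Int)) := by
    apply List.map_congr_left
    intro i _
    rw [PySem.List.foldl_ite_add_one
      (p := fun j => (PySem.List.pyGetD score i []).sum < (PySem.List.pyGetD score j []).sum)]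
    rw [countP_pyGet score (fun t => decide ((PySem.List.pyGetD score i []).sum < t.sum))]
  rw [h1,
    map_pyGet_map score (fun r => 1 + (score.countP (fun t => decide (r.sum < t.sum)) : Int)),
    List.map_map]
  apply List.map_congr_left
  intro r _
  simp only [Function.comp_def]
  congr 1
  rw [List.countP_map]
  simp only [Function.comp_def]

-- ===== VERDICT (by name: the statement is the Claim_ definition above) =====
theorem solution_spec : Claim_equal_solution := by
  intro score _
  show solution score = solution_alt score
  rw [solution_eq_canon]
  unfold solution_alt
  apply Eq.symm
  apply List.map_congr_left
  intro s hs
  set sums := score.map (fun r => r.sum) with hsums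
  set desc := (PySem.List.sorted sums (fun x => x)).reverse with hdesc
  have hperm : desc.Perm sums :=
    (List.reverse_perm _).trans (PySem.List.sorted_perm sums (fun x => x) false)
  have hmem : s ∈ desc := hperm.mem_iff.2 hs
  have hpw : desc.Pairwise (fun a b => b ≤ a) := by
    rw [hdesc, List.pairwise_reverse]
    exact PySem.List.sorted_pairwise sums (fun x => x)
  have hempty : (PySem.Dict.empty : PySem.Dict Int Int).contains s = false := rfl
  have hstep : (fun (d : PySem.Dict Int Int) (p : Int × Nat) =>
      if d.contains p.1 then d else d.insert p.1 ((p.2 : Int) + 1)) = rankStep := rfl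
  rw [hstep, rank_fold_get desc 0 _ s hmem hempty]
  rw [idxOf_eq_countP_gt desc hpw s hmem, hperm.countP_eq]
  simp [Option.getD]
  ring
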